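-- pv_equiv track=rewrite | github.com/omegaestable/magma-ai | build_graph_cheatsheet_v2.py | compress_int_list
-- ===== SOURCE A (Python) =====
-- def compress_int_list(nums):
--     """Compress a sorted list of integers using run-length encoding.
--     E.g., [1,2,3,4,7,8,9,15] -> '1-4,7-9,15'"""
--     if not nums:
--         return ''
--     nums = sorted(nums)
--     ranges = []
--     start = nums[0]
--     end = nums[0]
--     for n in nums[1:]:
--         if n == end + 1:
--             end = n
--         else:
--             if start == end:
--                 ranges.append(str(start))
--             elif end == start + 1:
--                 ranges.append(f"{start},{end}")
--             else:
--                 ranges.append(f"{start}-{end}")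
--             start = n
--             end = n
--     if start == end:
--         ranges.append(str(start))
--     elif end == start + 1:
--         ranges.append(f"{start},{end}")
--     else:
--         ranges.append(f"{start}-{end}")
--     return ','.join(ranges)
-- ===== SOURCE B (Python) =====
-- def compress_int_list(nums):
--     """Compress a sorted list of integers using run-length encoding.
--     Staged passes: sort, compute all run-break indices in one comprehension,
--     then format each [a,b) segment by its boundary pair."""
--     if not nums:
--         return ''
--     s = sorted(nums)
--     n = len(s)
--     breaks = [i for i in range(1, n) if s[i] != s[i - 1] + 1]
--     bounds = [0] + breaks + [n]
--     parts = [
--         (str(s[a]) if s[b - 1] == s[a] else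
--          f"{s[a]},{s[b-1]}" if s[b - 1] == s[a] + 1 else
--          f"{s[a]}-{s[b-1]}")
--         for a, b in zip(bounds, bounds[1:])
--     ]
--     return ','.join(parts)
-- ===== Notes on version B (the rewrite author's own statement) =====
-- stated objective: alternative
-- what changed: Replaces A's single stateful scan carrying (ranges, start, end) with staged passes: one comprehension computes all run-break indices, then each run is formatted directly from its boundary index pair (zip of bounds with its own tail); no run state is carried.
import Mathlib
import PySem

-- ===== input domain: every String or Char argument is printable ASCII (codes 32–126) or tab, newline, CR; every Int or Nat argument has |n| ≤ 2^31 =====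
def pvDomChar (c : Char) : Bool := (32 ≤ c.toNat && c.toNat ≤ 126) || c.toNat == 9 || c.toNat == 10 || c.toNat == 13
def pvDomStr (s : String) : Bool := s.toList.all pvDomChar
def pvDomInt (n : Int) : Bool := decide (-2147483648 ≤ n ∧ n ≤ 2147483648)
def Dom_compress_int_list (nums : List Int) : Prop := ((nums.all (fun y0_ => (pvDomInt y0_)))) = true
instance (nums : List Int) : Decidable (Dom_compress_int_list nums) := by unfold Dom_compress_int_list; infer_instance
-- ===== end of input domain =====

-- B replaces A's stateful scan (ranges, start, end) by staged passes: it first computes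
-- all run-break indices with a filter over the index range, then formats each run from
-- its boundary index pair; same return value, same cost.

-- ===== PORT A =====
-- A's loop step over nums[1:], state (ranges, start, end); the three-way if-chain is
-- written out inline here and again after the loop, exactly as A repeats it.
def pvStepA (st : List String × Int × Int) (n : Int) : List String × Int × Int :=
  if n = st.2.2 + 1 then (st.1, st.2.1, n)
  else
    (st.1 ++ [if st.2.1 = st.2.2 then PySem.Int.toStr st.2.1
              else if st.2.2 = st.2.1 + 1 then PySem.Int.toStr st.2.1 ++ "," ++ PySem.Int.toStr st.2.2
              else PySem.Int.toStr st.2.1 ++ "-" ++ PySem.Int.toStr st.2.2], n, n)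

def compress_int_list (nums : List Int) : String :=
  if nums = [] then ""
  else
    match PySem.List.sorted nums (fun x => x) false with
    | [] => ""  -- unreachable: sorted of a nonempty list is nonempty
    | h :: t =>
      let st := t.foldl pvStepA ([], h, h)
      PySem.Str.join "," (st.1 ++
        [if st.2.1 = st.2.2 then PySem.Int.toStr st.2.1
         else if st.2.2 = st.2.1 + 1 then PySem.Int.toStr st.2.1 ++ "," ++ PySem.Int.toStr st.2.2
         else PySem.Int.toStr st.2.1 ++ "-" ++ PySem.Int.toStr st.2.2])

-- ===== PORT B =====
-- Source B's break test at index i: s[i] != s[i-1] + 1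
def pvBrk (s : List Int) (i : Int) : Bool :=
  PySem.List.pyGetD s i 0 != PySem.List.pyGetD s (i - 1) 0 + 1

-- Source B's conditional-expression formatting of one segment with first value lo, last hi
def pvFmtB (lo hi : Int) : String :=
  if hi = lo then PySem.Int.toStr lo
  else if hi = lo + 1 then PySem.Int.toStr lo ++ "," ++ PySem.Int.toStr hi
  else PySem.Int.toStr lo ++ "-" ++ PySem.Int.toStr hi

def compress_int_list_alt (nums : List Int) : String :=
  if nums = [] then ""
  else
    let s := PySem.List.sorted nums (fun x => x) false
    let n : Int := (s.length : Int)
    let breaks := (PySem.List.pyRange 1 n 1).filter (pvBrk s)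
    let bounds := [(0 : Int)] ++ breaks ++ [n]
    let parts := (bounds.zip (PySem.List.slice bounds (some 1) none)).map
      (fun ab => pvFmtB (PySem.List.pyGetD s ab.1 0) (PySem.List.pyGetD s (ab.2 - 1) 0))
    PySem.Str.join "," parts

-- ===== PRECONDITION & SPEC =====
def Spec_compress_int_list (nums : List Int) (out : String) : Prop := out = compress_int_list_alt nums
instance (nums : List Int) (out : String) : Decidable (Spec_compress_int_list nums out) := by unfold Spec_compress_int_list; infer_instance

-- ===== CLAIM (what is proved, stated in full; the proofs are below) =====
def Claim_equal_compress_int_list : Prop := ∀ (nums : List Int), Dom_compress_int_list nums → Spec_compress_int_list nums (compress_int_list nums)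

-- ===== LEMMAS AND PROOFS =====

-- run splitting used only by the proofs: given the previous value p, peel off the
-- maximal consecutive continuation of the run from the remaining list
def pvSplit : Int → List Int → List Int × List Int
  | _, [] => ([], [])
  | p, x :: xs => if x = p + 1 then ((x :: (pvSplit x xs).1), (pvSplit x xs).2) else ([], x :: xs)

theorem pvSplit_len : ∀ (p : Int) (xs : List Int), (pvSplit p xs).2.length ≤ xs.length
  | _, [] => Nat.le_refl _
  | p, x :: xs => by
    unfold pvSplit
    split
    · exact Nat.le_succ_of_le (pvSplit_len x xs)
    · exact Nat.le_refl _

theorem pvSplit_append : ∀ (p : Int) (xs : List Int), (pvSplit p xs).1 ++ (pvSplit p xs).2 = xs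
  | _, [] => rfl
  | p, x :: xs => by
    unfold pvSplit
    split
    · simpa using pvSplit_append x xs
    · rfl

-- the list of formatted runs, the common characterization of both programs
def pvRuns : List Int → List String
  | [] => []
  | x :: xs => pvFmtB x ((pvSplit x xs).1.getLastD x) :: pvRuns (pvSplit x xs).2
  termination_by xs => xs.length
  decreasing_by exact Nat.lt_succ_of_le (pvSplit_len x xs)

theorem fmtA_eq_fmtB (lo hi : Int) :
    (if lo = hi then PySem.Int.toStr lo
     else if hi = lo + 1 then PySem.Int.toStr lo ++ "," ++ PySem.Int.toStr hi
     else PySem.Int.toStr lo ++ "-" ++ PySem.Int.toStr hi) = pvFmtB lo hi := by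
  unfold pvFmtB
  by_cases h : lo = hi
  · simp [h]
  · have h' : ¬ hi = lo := fun he => h he.symm
    simp [h, h']

-- ===== A-side: the fold plus its trailing append emits exactly the runs =====
theorem loop_eq_runs : ∀ (l : List Int) (acc : List String) (s e : Int),
    (l.foldl pvStepA (acc, s, e)).1 ++
      [if (l.foldl pvStepA (acc, s, e)).2.1 = (l.foldl pvStepA (acc, s, e)).2.2 then
         PySem.Int.toStr (l.foldl pvStepA (acc, s, e)).2.1
       else if (l.foldl pvStepA (acc, s, e)).2.2 = (l.foldl pvStepA (acc, s, e)).2.1 + 1 then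
         PySem.Int.toStr (l.foldl pvStepA (acc, s, e)).2.1 ++ "," ++ PySem.Int.toStr (l.foldl pvStepA (acc, s, e)).2.2
       else PySem.Int.toStr (l.foldl pvStepA (acc, s, e)).2.1 ++ "-" ++ PySem.Int.toStr (l.foldl pvStepA (acc, s, e)).2.2]
      = acc ++ pvFmtB s ((pvSplit e l).1.getLastD e) :: pvRuns (pvSplit e l).2
  | [], acc, s, e => by
    simp [pvSplit, pvRuns, fmtA_eq_fmtB]
  | x :: l, acc, s, e => by
    simp only [List.foldl_cons, pvStepA, pvSplit]
    by_cases hx : x = e + 1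
    · simp only [if_pos hx]
      rw [loop_eq_runs l acc s x, List.getLastD_cons]
    · simp only [if_neg hx]
      rw [loop_eq_runs l _ x x]
      have hB : pvRuns (x :: l) = pvFmtB x ((pvSplit x l).1.getLastD x) :: pvRuns (pvSplit x l).2 := by
        rw [pvRuns]
      rw [hB]
      simp [fmtA_eq_fmtB]
  termination_by l => l.length

-- ===== B-side: indexing and break-list structure =====
theorem pyGetD_append_nat (pre l : List Int) (j : Nat) (d : Int) :
    PySem.List.pyGetD (pre ++ l) ((pre.length : Int) + (j : Int)) d = l.getD j d := by
  have h : ((pre.length : Int) + (j : Int)) = ((pre.length + j : Nat) : Int) := by push_cast; ring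
  rw [h, PySem.List.pyGetD_natCast]
  simp [List.getD_eq_getElem?_getD, List.getElem?_append_right (Nat.le_add_right _ _)]

theorem breaks_eq : ∀ (xs : List Int) (x : Int) (pre : List Int),
    (PySem.List.pyRange ((pre.length : Int) + 1) ((pre.length : Int) + 1 + (xs.length : Int)) 1).filter
        (pvBrk (pre ++ x :: xs))
    = if (pvSplit x xs).2 = [] then []
      else ((pre.length : Int) + 1 + ((pvSplit x xs).1.length : Int)) ::
        ((PySem.List.pyRange ((pre.length : Int) + 2 + ((pvSplit x xs).1.length : Int))
            ((pre.length : Int) + 1 + (xs.length : Int)) 1).filter (pvBrk (pre ++ x :: xs)))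
  | [], x, pre => by
    simp only [pvSplit, List.length_nil, Nat.cast_zero, add_zero]
    rw [PySem.List.pyRange_one_eq_nil (le_refl _)]
    simp
  | y :: ys, x, pre => by
    rw [PySem.List.pyRange_one_cons (by push_cast [List.length_cons]; omega), List.filter_cons]
    have hgy : PySem.List.pyGetD (pre ++ x :: y :: ys) ((pre.length : Int) + 1) 0 = y := by
      have := pyGetD_append_nat pre (x :: y :: ys) 1 0
      simpa using this
    have hgx : PySem.List.pyGetD (pre ++ x :: y :: ys) ((pre.length : Int) + 1 - 1) 0 = x := by
      have := pyGetD_append_nat pre (x :: y :: ys) 0 0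
      simpa using this
    by_cases hy : y = x + 1
    · have hb : pvBrk (pre ++ x :: y :: ys) ((pre.length : Int) + 1) = false := by
        simp only [pvBrk]
        rw [hgy, hgx]
        simp [hy]
      rw [hb]
      simp only [Bool.false_eq_true, if_false]
      have ih := breaks_eq ys y (pre ++ [x])
      rw [show (pre ++ [x]) ++ y :: ys = pre ++ x :: y :: ys by simp] at ih
      simp only [pvSplit, if_pos hy]
      simp only [List.length_append, List.length_cons, List.length_nil] at ih ⊢
      by_cases hr : (pvSplit y ys).2 = []
      · simp only [if_pos hr] at ih ⊢
        push_cast at ih ⊢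
        ring_nf at ih ⊢
        exact ih
      · simp only [if_neg hr] at ih ⊢
        push_cast at ih ⊢
        ring_nf at ih ⊢
        exact ih
    · have hb : pvBrk (pre ++ x :: y :: ys) ((pre.length : Int) + 1) = true := by
        simp only [pvBrk]
        rw [hgy, hgx]
        simp [hy]
      rw [hb]
      simp only [pvSplit, if_neg hy]
      rw [if_neg (by simp : ¬ (y :: ys) = ([] : List Int))]
      simp only [List.length_nil, Nat.cast_zero]
      push_cast
      ring_nf

theorem run_last : ∀ (xs : List Int) (x : Int) (pre : List Int) (d : Int),
    PySem.List.pyGetD (pre ++ x :: xs) ((pre.length : Int) + ((pvSplit x xs).1.length : Int)) d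
      = (pvSplit x xs).1.getLastD x
  | [], x, pre, d => by
    have := pyGetD_append_nat pre (x :: []) 0 d
    simpa [pvSplit] using this
  | y :: ys, x, pre, d => by
    by_cases hy : y = x + 1
    · simp only [pvSplit, if_pos hy]
      have ih := run_last ys y (pre ++ [x]) d
      rw [show (pre ++ [x]) ++ y :: ys = pre ++ x :: y :: ys by simp] at ih
      simp only [List.length_append, List.length_cons, List.length_nil] at ih
      rw [List.getLastD_cons]
      simp only [List.length_cons]
      push_cast at ih ⊢
      ring_nf at ih ⊢
      exact ih
    · simp only [pvSplit, if_neg hy]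
      have := pyGetD_append_nat pre (x :: y :: ys) 0 d
      simpa using this

-- ===== B-side main lemma: boundary pairs formatted = the runs =====
theorem parts_eq_runs : ∀ (rest pre : List Int), rest ≠ [] →
    ((((pre.length : Int) ::
        (((PySem.List.pyRange ((pre.length : Int) + 1) ((pre.length : Int) + (rest.length : Int)) 1).filter
            (pvBrk (pre ++ rest))) ++ [(pre.length : Int) + (rest.length : Int)]))).zip
      (((PySem.List.pyRange ((pre.length : Int) + 1) ((pre.length : Int) + (rest.length : Int)) 1).filter
          (pvBrk (pre ++ rest))) ++ [(pre.length : Int) + (rest.length : Int)])).map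
      (fun ab => pvFmtB (PySem.List.pyGetD (pre ++ rest) ab.1 0) (PySem.List.pyGetD (pre ++ rest) (ab.2 - 1) 0))
    = pvRuns rest
  | [], _, h => absurd rfl h
  | x :: xs, pre, _ => by
    have hlen : ((x :: xs).length : Int) = 1 + (xs.length : Int) := by simp; ring
    have hbr := breaks_eq xs x pre
    have hsplit := pvSplit_append x xs
    by_cases hr : (pvSplit x xs).2 = []
    · -- single run: no breaks
      rw [if_pos hr] at hbr
      have hxs : xs.length = (pvSplit x xs).1.length := by
        have := congrArg List.length hsplit
        simp [hr] at this
        omega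
      rw [hlen]
      have harg : (pre.length : Int) + (1 + (xs.length : Int)) = (pre.length : Int) + 1 + (xs.length : Int) := by ring
      rw [harg, hbr]
      simp only [List.nil_append, List.zip_cons_cons, List.zip_nil_right, List.map_cons, List.map_nil]
      have hg0 : PySem.List.pyGetD (pre ++ x :: xs) ((pre.length : Int)) 0 = x := by
        have := pyGetD_append_nat pre (x :: xs) 0 0
        simpa using this
      have hgl : PySem.List.pyGetD (pre ++ x :: xs) ((pre.length : Int) + 1 + (xs.length : Int) - 1) 0
          = (pvSplit x xs).1.getLastD x := by
        have := run_last xs x pre 0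
        have harg2 : (pre.length : Int) + 1 + (xs.length : Int) - 1 = (pre.length : Int) + ((pvSplit x xs).1.length : Int) := by
          rw [← hxs]; ring
        rw [harg2]; exact this
      rw [hg0, hgl]
      rw [pvRuns, hr, pvRuns]
    · -- break after the first run; recurse on the remainder
      rw [if_neg hr] at hbr
      rw [hlen]
      have harg : (pre.length : Int) + (1 + (xs.length : Int)) = (pre.length : Int) + 1 + (xs.length : Int) := by ring
      rw [harg, hbr]
      simp only [List.cons_append, List.zip_cons_cons, List.map_cons]
      have hg0 : PySem.List.pyGetD (pre ++ x :: xs) ((pre.length : Int)) 0 = x := by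
        have := pyGetD_append_nat pre (x :: xs) 0 0
        simpa using this
      have hgl : PySem.List.pyGetD (pre ++ x :: xs) ((pre.length : Int) + 1 + ((pvSplit x xs).1.length : Int) - 1) 0
          = (pvSplit x xs).1.getLastD x := by
        have := run_last xs x pre 0
        have harg2 : (pre.length : Int) + 1 + ((pvSplit x xs).1.length : Int) - 1
            = (pre.length : Int) + ((pvSplit x xs).1.length : Int) := by ring
        rw [harg2]; exact this
      rw [hg0, hgl]
      -- the tail is the recursive call with pre' = pre ++ x :: (pvSplit x xs).1
      have ih := parts_eq_runs (pvSplit x xs).2 (pre ++ x :: (pvSplit x xs).1) hr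
      have hpre2 : (pre ++ x :: (pvSplit x xs).1) ++ (pvSplit x xs).2 = pre ++ x :: xs := by
        rw [List.append_assoc, List.cons_append, hsplit]
      have hlen2 : (((pre ++ x :: (pvSplit x xs).1).length : Nat) : Int)
          = (pre.length : Int) + 1 + ((pvSplit x xs).1.length : Int) := by
        simp; ring
      rw [hpre2, hlen2] at ih
      have hxslen : (xs.length : Int) = ((pvSplit x xs).1.length : Int) + ((pvSplit x xs).2.length : Int) := by
        have := congrArg List.length hsplit
        simp at this
        omega
      have hn2 : (pre.length : Int) + 1 + ((pvSplit x xs).1.length : Int) + (((pvSplit x xs).2.length : Nat) : Int)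
          = (pre.length : Int) + 1 + (xs.length : Int) := by rw [hxslen]; ring
      rw [hn2] at ih
      have hn3 : (pre.length : Int) + 1 + ((pvSplit x xs).1.length : Int) + 1
          = (pre.length : Int) + 2 + ((pvSplit x xs).1.length : Int) := by ring
      rw [hn3] at ih
      rw [ih]
      rw [pvRuns]
  termination_by rest => rest.length
  decreasing_by simp only [List.length_cons]; exact Nat.lt_succ_of_le (pvSplit_len x xs)

theorem compress_eq (nums : List Int) : compress_int_list nums = compress_int_list_alt nums := by
  unfold compress_int_list compress_int_list_alt
  by_cases h : nums = []
  · simp [h]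
  · simp only [if_neg h]
    rcases hs : PySem.List.sorted nums (fun x => x) false with _ | ⟨hd, t⟩
    · exact absurd ((PySem.List.sorted_eq_nil_iff nums (fun x => x) false).mp hs) h
    · dsimp only
      have hA := loop_eq_runs t [] hd hd
      simp only [List.nil_append] at hA
      rw [hA, PySem.List.slice_from_one]
      have hB := parts_eq_runs (hd :: t) [] (by simp)
      simp only [List.length_nil, Nat.cast_zero, List.nil_append, zero_add] at hB
      simp only [List.cons_append, List.tail_cons, List.nil_append]
      rw [hB]
      conv_rhs => rw [pvRuns]

-- ===== VERDICT (by name: the statement is the Claim_ definition above) =====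
theorem compress_int_list_spec : Claim_equal_compress_int_list := by
  intro nums _
  exact compress_eq nums
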